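-- pv_equiv track=rewrite | github.com/pkkalive/DSA | Arrays/AlternatingSubarrays.py | alternating_sub_array_2
-- ===== SOURCE A (Python) =====
-- def alternating_sub_array_2(arr, k):
--     n = len(arr)
--     ans = []
--     start = 0
--     size = 2 * k + 1
--     for i in range(n - size + 1):
--         flag = arr[i]
--         correct = True
--         for j in range(i, i + size):
--             if arr[j] == flag:
--                 flag = 1 - flag
--             else:
--                 correct = False
--         if correct:
--             ans.append(i + size//2)
--     return ans
-- ===== SOURCE B (Python) =====
-- def alternating_sub_array_2(arr, k):
--     n = len(arr)
--     if k < 0 or 2 * k >= n: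
--         return []
--     up = [1] * n
--     for i in range(1, n):
--         up[i] = up[i - 1] + 1 if arr[i] == 1 - arr[i - 1] else 1
--     return [j - k for j in range(2 * k, n) if up[j] >= 2 * k + 1]
-- ===== Notes on version B (the rewrite author's own statement) =====
-- stated objective: alternative
-- what changed: Instead of re-scanning each length-(2k+1) window with an inner flag loop, B makes one pass computing the alternating-run length ending at each index and emits a center whenever that run covers the window.
-- crash fix: For every k < 0 A raises IndexError (the negative window size makes the outer range run past the end of the array); B returns []. — e.g. on alternating_sub_array_2([], -1): A raises IndexError, B returns []
import Mathlib
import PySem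

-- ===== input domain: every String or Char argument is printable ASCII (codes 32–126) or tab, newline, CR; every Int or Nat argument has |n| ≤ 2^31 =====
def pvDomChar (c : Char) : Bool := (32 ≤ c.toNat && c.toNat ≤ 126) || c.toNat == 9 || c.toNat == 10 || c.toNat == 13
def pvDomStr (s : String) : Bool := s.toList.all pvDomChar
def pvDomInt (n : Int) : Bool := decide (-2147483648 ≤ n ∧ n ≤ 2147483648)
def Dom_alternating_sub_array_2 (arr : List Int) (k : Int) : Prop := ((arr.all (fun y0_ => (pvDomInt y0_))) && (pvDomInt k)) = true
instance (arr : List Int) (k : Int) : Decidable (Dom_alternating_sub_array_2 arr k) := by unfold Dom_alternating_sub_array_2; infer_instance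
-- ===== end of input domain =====

-- B replaces A's per-window rescan by a single pass over alternating-run lengths (a different algorithm, same measured cost).

-- ===== PORT A =====
-- literal transliteration of A; pyGetD's default is never used: under Pre_ (0 ≤ k) every index is in range
def alternating_sub_array_2 (arr : List Int) (k : Int) : List Int :=
  let n : Int := (arr.length : Int)
  let size : Int := 2 * k + 1
  (PySem.List.pyRange 0 (n - size + 1)).foldl
    (fun ans i =>
      let flag := PySem.List.pyGetD arr i 0
      let st := (PySem.List.pyRange i (i + size)).foldl
        (fun (st : Int × Bool) j =>
          if PySem.List.pyGetD arr j 0 == st.1 then (1 - st.1, st.2) else (st.1, false))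
        (flag, true)
      if st.2 then ans ++ [i + PySem.Int.floordiv size 2] else ans)
    []

-- ===== PORT B =====
-- transliteration of Source B: guard k < 0, build the run-length array `up`, then the comprehension
def alternating_sub_array_2_alt (arr : List Int) (k : Int) : List Int :=
  let n : Int := (arr.length : Int)
  if k < 0 ∨ 2 * k ≥ n then []
  else
    let up : List Int :=
      (PySem.List.pyRange 1 n).foldl
        (fun up i =>
          up.set i.toNat
            (if PySem.List.pyGetD arr i 0 == 1 - PySem.List.pyGetD arr (i - 1) 0
             then PySem.List.pyGetD up (i - 1) 0 + 1 else 1))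
        (List.replicate arr.length 1)
    ((PySem.List.pyRange (2 * k) n).filter
        (fun j => decide (2 * k + 1 ≤ PySem.List.pyGetD up j 0))).map (fun j => j - k)

-- ===== PRECONDITION & SPEC =====
-- A raises IndexError exactly when k < 0 (the outer range then runs past the array's end)
def Pre_alternating_sub_array_2 (arr : List Int) (k : Int) : Prop := 0 ≤ k
instance (arr : List Int) (k : Int) : Decidable (Pre_alternating_sub_array_2 arr k) := by unfold Pre_alternating_sub_array_2; infer_instance
def pvWitness_alternating_sub_array_2 : List Int × Int := ([1, 0, 1, 0], 1)

-- For every k < 0 A raises IndexError; B returns [].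
def Raises_alternating_sub_array_2 (arr : List Int) (k : Int) : Prop := k < 0
instance (arr : List Int) (k : Int) : Decidable (Raises_alternating_sub_array_2 arr k) := by unfold Raises_alternating_sub_array_2; infer_instance
def pvRaiseWitness_alternating_sub_array_2 : List Int × Int := ([], -1)
def pvRaiseWitnessOut_alternating_sub_array_2 : List Int := []

def Spec_alternating_sub_array_2 (arr : List Int) (k : Int) (out : List Int) : Prop := out = alternating_sub_array_2_alt arr k
instance (arr : List Int) (k : Int) (out : List Int) : Decidable (Spec_alternating_sub_array_2 arr k out) := by unfold Spec_alternating_sub_array_2; infer_instance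

-- ===== CLAIM (what is proved, stated in full; the proofs are below) =====
def Claim_equal_alternating_sub_array_2 : Prop := ∀ (arr : List Int) (k : Int), Dom_alternating_sub_array_2 arr k → Pre_alternating_sub_array_2 arr k → Spec_alternating_sub_array_2 arr k (alternating_sub_array_2 arr k)
def Claim_raises_alternating_sub_array_2 : Prop := (∀ (arr : List Int) (k : Int), Dom_alternating_sub_array_2 arr k → Raises_alternating_sub_array_2 arr k → ¬ Pre_alternating_sub_array_2 arr k) ∧ (Dom_alternating_sub_array_2 (pvRaiseWitness_alternating_sub_array_2.1) (pvRaiseWitness_alternating_sub_array_2.2) ∧ Raises_alternating_sub_array_2 (pvRaiseWitness_alternating_sub_array_2.1) (pvRaiseWitness_alternating_sub_array_2.2) ∧ alternating_sub_array_2_alt (pvRaiseWitness_alternating_sub_array_2.1) (pvRaiseWitness_alternating_sub_array_2.2) = pvRaiseWitnessOut_alternating_sub_array_2)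

-- ===== LEMMAS AND PROOFS =====

-- arr.getD over Nat indices (default 0), A's expected-flag sequence, the chain condition, B's run length
def pvArrD (arr : List Int) (i : Nat) : Int := arr.getD i 0

def pvIter (f : Int) : Nat → Int
  | 0 => f
  | t + 1 => 1 - pvIter f t

abbrev pvChain (arr : List Int) (i m : Nat) : Prop :=
  ∀ t < m, pvArrD arr (i + t + 1) = 1 - pvArrD arr (i + t)

def pvRun (arr : List Int) : Nat → Int
  | 0 => 1
  | j + 1 => if pvArrD arr (j + 1) = 1 - pvArrD arr j then pvRun arr j + 1 else 1

-- shifted integer range as a mapped Nat range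
theorem pvRange_shift (c len : Nat) :
    PySem.List.pyRange (c : Int) ((c : Int) + (len : Int)) =
      (List.range len).map (fun t => ((c + t : Nat) : Int)) := by
  induction len with
  | zero => simp [PySem.List.pyRange]
  | succ m ih =>
      have h1 : ((c : Int) + ((m + 1 : Nat) : Int)) = ((c : Int) + (m : Int)) + 1 := by push_cast; ring
      rw [h1, PySem.List.pyRange_one_succ_right (by omega), ih, List.range_succ]
      simp

theorem pvRange_nil {a b : Int} (h : b ≤ a) : PySem.List.pyRange a b = [] := by
  refine List.eq_nil_iff_forall_not_mem.mpr (fun x hx => ?_)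
  have := PySem.List.mem_pyRange_one.mp hx
  omega

theorem pvRange_cast (c n : Nat) :
    PySem.List.pyRange (c : Int) (n : Int) =
      (List.range (n - c)).map (fun t => ((c + t : Nat) : Int)) := by
  by_cases h : c ≤ n
  · have h2 : (n : Int) = (c : Int) + ((n - c : Nat) : Int) := by omega
    rw [h2, pvRange_shift]
  · rw [Nat.sub_eq_zero_of_le (by omega), List.range_zero, List.map_nil,
      pvRange_nil (by omega)]

theorem pvRange_zero_sub (n c : Nat) :
    PySem.List.pyRange 0 ((n : Int) - (c : Int)) =
      (List.range (n - c)).map (fun t => ((t : Nat) : Int)) := by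
  by_cases h : c ≤ n
  · have h2 : ((n : Int) - (c : Int)) = ((n - c : Nat) : Int) := by omega
    rw [h2, PySem.List.pyRange_zero_natCast]
  · rw [Nat.sub_eq_zero_of_le (by omega), List.range_zero, List.map_nil,
      pvRange_nil (by omega)]

-- A's inner loop, started on flag f with correct=True, over the window [i, i+m)
theorem pvInner_success (arr : List Int) (i m : Nat) (f : Int)
    (h : ∀ t < m, pvArrD arr (i + t) = pvIter f t) :
    ((PySem.List.pyRange (i : Int) ((i : Int) + (m : Int))).foldl
      (fun (st : Int × Bool) j =>
        if PySem.List.pyGetD arr j 0 == st.1 then (1 - st.1, st.2) else (st.1, false))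
      (f, true)) = (pvIter f m, true) := by
  induction m with
  | zero => simp [PySem.List.pyRange, pvIter]
  | succ m ih =>
      have h1 : ((i : Int) + ((m + 1 : Nat) : Int)) = ((i : Int) + (m : Int)) + 1 := by push_cast; ring
      rw [h1, PySem.List.pyRange_one_succ_right (by omega), List.foldl_append]
      rw [ih (fun t ht => h t (by omega))]
      have hc : ((i : Int) + (m : Int)) = ((i + m : Nat) : Int) := by push_cast; ring
      have hv : PySem.List.pyGetD arr ((i : Int) + (m : Int)) 0 = pvIter f m := by
        rw [hc, PySem.List.pyGetD_natCast]
        exact h m (by omega)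
      simp only [List.foldl_cons, List.foldl_nil, hv, beq_self_eq_true, if_pos]
      rfl

theorem pvInner_snd (arr : List Int) (i m : Nat) (f : Int) :
    ((PySem.List.pyRange (i : Int) ((i : Int) + (m : Int))).foldl
      (fun (st : Int × Bool) j =>
        if PySem.List.pyGetD arr j 0 == st.1 then (1 - st.1, st.2) else (st.1, false))
      (f, true)).2 = decide (∀ t < m, pvArrD arr (i + t) = pvIter f t) := by
  induction m with
  | zero => simp [PySem.List.pyRange]
  | succ m ih =>
      have h1 : ((i : Int) + ((m + 1 : Nat) : Int)) = ((i : Int) + (m : Int)) + 1 := by push_cast; ring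
      rw [h1, PySem.List.pyRange_one_succ_right (by omega), List.foldl_append]
      have hiff : (∀ t < m + 1, pvArrD arr (i + t) = pvIter f t) ↔
          ((∀ t < m, pvArrD arr (i + t) = pvIter f t) ∧ pvArrD arr (i + m) = pvIter f m) := by
        constructor
        · exact fun h => ⟨fun t ht => h t (by omega), h m (by omega)⟩
        · rintro ⟨ha, hb⟩ t ht
          rcases Nat.lt_succ_iff_lt_or_eq.mp ht with h' | h'
          · exact ha t h'
          · subst h'; exact hb
      have hc : ((i : Int) + (m : Int)) = ((i + m : Nat) : Int) := by push_cast; ring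
      have hg : PySem.List.pyGetD arr ((i : Int) + (m : Int)) 0 = pvArrD arr (i + m) := by
        rw [hc, PySem.List.pyGetD_natCast]; rfl
      by_cases hall : ∀ t < m, pvArrD arr (i + t) = pvIter f t
      · rw [pvInner_success arr i m f hall]
        simp only [List.foldl_cons, List.foldl_nil, hg]
        by_cases hv : pvArrD arr (i + m) = pvIter f m
        · rw [if_pos (beq_iff_eq.mpr hv), decide_eq_true (hiff.mpr ⟨hall, hv⟩)]
        · rw [if_neg (by simpa using hv),
            decide_eq_false (fun hh => hv (hiff.mp hh).2)]
      · rcases hstp : (PySem.List.pyRange (i : Int) ((i : Int) + (m : Int))).foldl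
            (fun (st : Int × Bool) j =>
              if PySem.List.pyGetD arr j 0 == st.1 then (1 - st.1, st.2) else (st.1, false))
            (f, true) with ⟨g, c⟩
        have hsf : c = false := by
          have := ih
          rw [hstp] at this
          simpa [hall] using this
        subst hsf
        have hres : decide (∀ t < m + 1, pvArrD arr (i + t) = pvIter f t) = false := by
          simp only [hiff]
          simp [hall]
        rw [hres]
        simp only [List.foldl_cons, List.foldl_nil]
        split <;> rfl

-- the expected-flag check starting from arr[i] is exactly the chain condition
theorem pvOk_iff_chain (arr : List Int) (i m : Nat) :
    (∀ t < m + 1, pvArrD arr (i + t) = pvIter (pvArrD arr i) t) ↔ pvChain arr i m := by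
  constructor
  · intro h t ht
    have h1 := h t (by omega)
    have h2 := h (t + 1) (by omega)
    rw [show i + t + 1 = i + (t + 1) by ring, h2, pvIter, h1]
  · intro h t ht
    induction t with
    | zero => simp [pvIter]
    | succ s ihs =>
        rw [show i + (s + 1) = i + s + 1 by ring, pvIter, ← ihs (by omega)]
        exact h s (by omega)

theorem pvRun_ge_one (arr : List Int) (j : Nat) : 1 ≤ pvRun arr j := by
  induction j with
  | zero => simp [pvRun]
  | succ m ih => rw [pvRun]; split <;> omega

theorem pvRun_ge_iff_chain (arr : List Int) (i m : Nat) :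
    ((m : Int) + 1 ≤ pvRun arr (i + m)) ↔ pvChain arr i m := by
  induction m with
  | zero =>
      simp only [Nat.cast_zero, zero_add, Nat.add_zero]
      constructor
      · intro _ t ht; omega
      · intro _; exact pvRun_ge_one arr i
  | succ m ih =>
      rw [show i + (m + 1) = (i + m) + 1 by ring, pvRun]
      by_cases hc : pvArrD arr (i + m + 1) = 1 - pvArrD arr (i + m)
      · rw [if_pos hc]
        constructor
        · intro h t ht
          rcases Nat.lt_succ_iff_lt_or_eq.mp ht with h' | h'
          · exact ih.mp (by push_cast at h ⊢; omega) t h'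
          · subst h'; exact hc
        · intro h
          have := ih.mpr (fun t ht => h t (by omega))
          push_cast; omega
      · rw [if_neg hc]
        constructor
        · intro h; exfalso; push_cast at h; omega
        · intro h; exact absurd (h m (by omega)) hc

-- the value of the `up` array B builds: up[j] = pvRun j once the loop has passed j
theorem pvUp_eq (arr : List Int) (m : Nat) (hm : m ≤ arr.length) :
    ((PySem.List.pyRange 1 (m : Int)).foldl
      (fun up i =>
        up.set i.toNat
          (if PySem.List.pyGetD arr i 0 == 1 - PySem.List.pyGetD arr (i - 1) 0
           then PySem.List.pyGetD up (i - 1) 0 + 1 else 1))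
      (List.replicate arr.length 1)) =
    (List.range arr.length).map (fun j => if j < m then pvRun arr j else 1) := by
  induction m with
  | zero =>
      rw [Nat.cast_zero, pvRange_nil (by omega), List.foldl_nil]
      apply List.ext_getElem (by simp)
      intro j hj hj'
      simp
  | succ m ih =>
      rcases Nat.eq_zero_or_pos m with h0 | hpos
      · subst h0
        rw [show ((1 : Nat) : Int) = 1 by norm_num, pvRange_nil (by omega), List.foldl_nil]
        apply List.ext_getElem (by simp)
        intro j hj hj'
        simp only [List.getElem_replicate, List.getElem_map, List.getElem_range]
        split
        · next h => have : j = 0 := by omega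
                    subst this; simp [pvRun]
        · rfl
      · have h1 : ((m + 1 : Nat) : Int) = (m : Int) + 1 := by push_cast; ring
        rw [h1, PySem.List.pyRange_one_succ_right (by exact_mod_cast hpos), List.foldl_append,
          ih (by omega)]
        simp only [List.foldl_cons, List.foldl_nil]
        have hm1 : ((m : Int) - 1) = ((m - 1 : Nat) : Int) := by omega
        have hup : PySem.List.pyGetD
            ((List.range arr.length).map (fun j => if j < m then pvRun arr j else 1))
            ((m : Int) - 1) 0 = pvRun arr (m - 1) := by
          rw [hm1, PySem.List.pyGetD_natCast]
          have hlt : m - 1 < arr.length := by omega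
          rw [List.getD_eq_getElem?_getD, List.getElem?_eq_getElem (by simpa using hlt)]
          simp only [List.getElem_map, List.getElem_range, Option.getD_some]
          rw [if_pos (by omega)]
        have hget : PySem.List.pyGetD arr (m : Int) 0 = pvArrD arr m := by
          rw [PySem.List.pyGetD_natCast]; rfl
        have hget' : PySem.List.pyGetD arr ((m : Int) - 1) 0 = pvArrD arr (m - 1) := by
          rw [hm1, PySem.List.pyGetD_natCast]; rfl
        rw [hup, hget, hget']
        have hrw : pvRun arr m =
            if pvArrD arr m = 1 - pvArrD arr (m - 1) then pvRun arr (m - 1) + 1 else 1 := by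
          conv_lhs => rw [show m = (m - 1) + 1 by omega, pvRun]
          rw [show m - 1 + 1 = m by omega]
        apply List.ext_getElem (by simp)
        intro j hj hj'
        simp only [List.length_set, List.length_map, List.length_range] at hj hj'
        rw [List.getElem_set]
        simp only [List.getElem_map, List.getElem_range, Int.toNat_natCast]
        by_cases hjm : m = j
        · rw [if_pos hjm, ← hjm, if_pos (show m < m + 1 by omega), hrw]
          by_cases hcnd : pvArrD arr m = 1 - pvArrD arr (m - 1)
          · rw [if_pos (beq_iff_eq.mpr hcnd), if_pos hcnd]
          · rw [if_neg (by simpa using hcnd), if_neg hcnd]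
        · rw [if_neg hjm]
          by_cases hlt : j < m
          · rw [if_pos hlt, if_pos (show j < m + 1 by omega)]
          · rw [if_neg hlt, if_neg (show ¬ j < m + 1 by omega)]

theorem pvMapFilter {l : List Nat} {p q : Nat → Bool} {f g : Nat → Int}
    (hp : ∀ t ∈ l, p t = q t) (hf : ∀ t ∈ l, f t = g t) :
    (l.filter p).map f = (l.filter q).map g := by
  rw [List.filter_congr hp]
  exact List.map_congr_left (fun t ht => hf t (List.mem_filter.mp ht).1)

-- ===== VERDICT (by name: the statement is the Claim_ definition above) =====
theorem alternating_sub_array_2_spec : Claim_equal_alternating_sub_array_2 := by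
  intro arr k _ hk
  unfold Spec_alternating_sub_array_2
  obtain ⟨K, rfl⟩ : ∃ K : Nat, k = (K : Int) := ⟨k.toNat, (Int.toNat_of_nonneg hk).symm⟩
  simp only [alternating_sub_array_2, alternating_sub_array_2_alt]
  by_cases hbig : 2 * (K : Int) ≥ (arr.length : Int)
  case pos =>
    rw [if_pos (Or.inr hbig),
      show ((arr.length : Int) - (2 * (K : Int) + 1) + 1) = ((arr.length : Int) - ((2 * K : Nat) : Int)) by push_cast; ring,
      pvRange_zero_sub arr.length (2 * K),
      show arr.length - 2 * K = 0 by omega]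
    simp
  case neg =>
  rw [if_neg (by omega)]
  -- A-side: turn the outer append-loop into filter + map
  rw [PySem.List.foldl_append_if
      (p := fun i => ((PySem.List.pyRange i (i + (2 * (K : Int) + 1))).foldl
        (fun (st : Int × Bool) j =>
          if PySem.List.pyGetD arr j 0 == st.1 then (1 - st.1, st.2) else (st.1, false))
        (PySem.List.pyGetD arr i 0, true)).2)
      (f := fun i => i + PySem.Int.floordiv (2 * (K : Int) + 1) 2),
    List.nil_append]
  -- B-side: the `up` array is the run-length table
  simp only [pvUp_eq arr arr.length (le_refl arr.length)]
  -- both index ranges as mapped Nat ranges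
  have hbound : ((arr.length : Int) - (2 * (K : Int) + 1) + 1) =
      ((arr.length : Int) - ((2 * K : Nat) : Int)) := by push_cast; ring
  have hBrange : PySem.List.pyRange (2 * (K : Int)) (arr.length : Int) =
      (List.range (arr.length - 2 * K)).map (fun t => ((2 * K + t : Nat) : Int)) := by
    have h := pvRange_cast (2 * K) arr.length
    rw [show ((2 * K : Nat) : Int) = 2 * (K : Int) by push_cast; ring] at h
    exact h
  rw [hbound, pvRange_zero_sub arr.length (2 * K), hBrange,
    List.filter_map, List.filter_map, List.map_map, List.map_map]
  have hfd : PySem.Int.floordiv (2 * (K : Int) + 1) 2 = (K : Int) :=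
    (PySem.Int.floordiv_eq_iff_of_pos (by norm_num)).mpr (by constructor <;> omega)
  refine pvMapFilter ?_ ?_
  · -- both tests decide the same chain condition
    intro t ht
    have htn : t + 2 * K < arr.length := by
      have := List.mem_range.mp ht
      omega
    simp only [Function.comp_apply]
    -- A's window test on start t
    have hcast : ((t : Int) + (2 * (K : Int) + 1)) = ((t : Int) + ((2 * K + 1 : Nat) : Int)) := by
      push_cast; ring
    have hflag : PySem.List.pyGetD arr (t : Int) 0 = pvArrD arr t := by
      rw [PySem.List.pyGetD_natCast]; rfl
    rw [hcast, hflag, pvInner_snd arr t (2 * K + 1) (pvArrD arr t)]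
    -- B's run-length test at the window's right end
    have hupv : PySem.List.pyGetD
        ((List.range arr.length).map (fun j => if j < arr.length then pvRun arr j else 1))
        (((2 * K + t : Nat) : Int)) 0 = pvRun arr (2 * K + t) := by
      rw [PySem.List.pyGetD_natCast, List.getD_eq_getElem?_getD,
        List.getElem?_eq_getElem (by simpa using (by omega : 2 * K + t < arr.length))]
      simp only [List.getElem_map, List.getElem_range, Option.getD_some]
      rw [if_pos (by omega)]
    rw [hupv]
    simp only [decide_eq_decide]
    rw [pvOk_iff_chain arr t (2 * K),
      show 2 * (K : Int) + 1 = ((2 * K : Nat) : Int) + 1 by push_cast; ring,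
      show 2 * K + t = t + 2 * K by ring]
    exact (pvRun_ge_iff_chain arr t (2 * K)).symm
  · -- both maps emit the window's center
    intro t ht
    simp only [Function.comp_apply]
    rw [hfd]
    push_cast
    ring

@[simp]
theorem alternating_sub_array_2_raises : Claim_raises_alternating_sub_array_2 := by
  unfold Claim_raises_alternating_sub_array_2
  exact ⟨fun arr k _ hr hp => absurd hp (by simpa [Pre_alternating_sub_array_2] using hr), by decide⟩
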